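-- pv_equiv track=rewrite | github.com/kywoo26/snowiki | snowiki/compiler/taxonomy.py | normalize_string_values
-- ===== SOURCE A (Python) =====
-- from collections.abc import Iterable, Mapping
-- from typing import Any
--
-- def sorted_unique(values: Iterable[str]) -> list[str]:
--     return sorted({value for value in values if value})
--
-- def normalize_string_values(value: Any) -> list[str]:
--     if value is None:
--         return []
--     if isinstance(value, str):
--         values = [value]
--     elif isinstance(value, Iterable):
--         values = [item for item in value if isinstance(item, str)]
--     else:
--         return []
--     return sorted_unique(item.strip() for item in values if item.strip())
-- ===== SOURCE B (Python) =====
-- from collections.abc import Iterable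
--
--
-- def _insert_unique(out, s):
--     # insert s into the sorted duplicate-free list out, keeping it sorted and unique
--     for i, cur in enumerate(out):
--         if cur == s:
--             return
--         if cur > s:
--             out.insert(i, s)
--             return
--     out.append(s)
--
--
-- def normalize_string_values(value):
--     if value is None:
--         return []
--     if isinstance(value, str):
--         items = [value]
--     elif isinstance(value, Iterable):
--         items = [x for x in value if isinstance(x, str)]
--     else:
--         return []
--     out = []
--     for x in items:
--         s = x.strip()
--         if s:
--             _insert_unique(out, s)
--     return out
-- ===== Notes on version B (the rewrite author's own statement) =====
-- stated objective: alternative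
-- what changed: B never sorts and never builds a set: it makes a single pass over the items, stripping each and inserting it into an ordered insertion position of a maintained sorted duplicate-free accumulator (insertion-sort with dedup-on-insert), instead of A's comprehension-into-set followed by sorted().
import Mathlib
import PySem

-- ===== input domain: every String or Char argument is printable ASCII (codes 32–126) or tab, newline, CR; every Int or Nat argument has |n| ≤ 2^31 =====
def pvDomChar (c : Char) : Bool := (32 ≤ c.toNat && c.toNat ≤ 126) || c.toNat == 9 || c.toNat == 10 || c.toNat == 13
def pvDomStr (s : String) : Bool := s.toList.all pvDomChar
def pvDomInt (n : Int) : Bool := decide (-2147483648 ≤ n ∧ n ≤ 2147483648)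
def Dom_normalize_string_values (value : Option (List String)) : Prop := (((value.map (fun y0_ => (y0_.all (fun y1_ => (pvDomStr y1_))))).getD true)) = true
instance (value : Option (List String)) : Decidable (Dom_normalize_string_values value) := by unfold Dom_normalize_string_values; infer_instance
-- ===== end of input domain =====

-- B replaces A's set-comprehension-then-sorted() by a single pass that inserts each stripped item
-- into its ordered position in a maintained sorted duplicate-free accumulator; alternative, not faster.
-- ===== PORT A =====
-- sorted_unique(values) = sorted({value for value in values if value})
def pySortedUnique (values : List String) : List String :=
  PySem.List.sorted (PySem.Set.ofList (values.filter (fun v => v ≠ ""))) (fun x => x) false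

-- value : Option (List String): the str / non-Iterable branches of A are outside this type; the
-- isinstance(item, str) filter keeps every element of a List String.
def normalize_string_values (value : Option (List String)) : List String :=
  match value with
  | none => []
  | some xs =>
    pySortedUnique ((xs.filter (fun i => PySem.Str.strip i ≠ "")).map PySem.Str.strip)

-- ===== PORT B =====
-- _insert_unique(out, s): scan out; stop unchanged on an equal element, insert before the first
-- larger one, append if none is larger (out is kept sorted and duplicate-free).
def pvInsertUnique : List String → String → List String
  | [], s => [s]
  | c :: t, s =>
    if c = s then c :: t
    else if c > s then s :: c :: t
    else c :: pvInsertUnique t s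

-- body of B's single loop: s = x.strip(); if s: _insert_unique(out, s)
def pvStep (out : List String) (x : String) : List String :=
  if PySem.Str.strip x ≠ "" then pvInsertUnique out (PySem.Str.strip x) else out

def normalize_string_values_alt (value : Option (List String)) : List String :=
  match value with
  | none => []
  | some xs => xs.foldl pvStep []

-- ===== PRECONDITION & SPEC =====
def Spec_normalize_string_values (value : Option (List String)) (out : List String) : Prop := out = normalize_string_values_alt value
instance (value : Option (List String)) (out : List String) : Decidable (Spec_normalize_string_values value out) := by unfold Spec_normalize_string_values; infer_instance

-- ===== CLAIM =====
def Claim_equal_normalize_string_values : Prop := ∀ (value : Option (List String)), Dom_normalize_string_values value → Spec_normalize_string_values value (normalize_string_values value)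

-- ===== LEMMAS AND PROOFS =====

-- inserting into a (<)-sorted list keeps it (<)-sorted and adds s to the members
lemma pvInsertUnique_spec (l : List String) (hl : l.Pairwise (· < ·)) (s : String) :
    (pvInsertUnique l s).Pairwise (· < ·) ∧
      ∀ x, (x ∈ pvInsertUnique l s ↔ x = s ∨ x ∈ l) := by
  induction l with
  | nil => simp [pvInsertUnique]
  | cons c t ih =>
    obtain ⟨hct, ht⟩ := List.pairwise_cons.mp hl
    by_cases h1 : c = s
    · subst h1
      refine ⟨by simpa [pvInsertUnique] using hl, fun x => by simp [pvInsertUnique]⟩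
    · by_cases h2 : c > s
      · refine ⟨?_, fun x => by simp [pvInsertUnique, h1, h2]⟩
        simp only [pvInsertUnique, h1, h2, if_false, if_true]
        exact List.pairwise_cons.mpr ⟨by
          intro y hy
          rcases List.mem_cons.mp hy with rfl | hyt
          · exact h2
          · exact lt_trans h2 (hct y hyt), hl⟩
      · have hcs : c < s := lt_of_le_of_ne (le_of_not_gt h2) h1
        obtain ⟨ihp, ihm⟩ := ih ht
        refine ⟨?_, fun x => by simp [pvInsertUnique, h1, h2, ihm]; tauto⟩
        simp only [pvInsertUnique, h1, h2, if_false]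
        refine List.pairwise_cons.mpr ⟨?_, ihp⟩
        intro y hy
        rcases (ihm y).mp hy with rfl | hyt
        · exact hcs
        · exact hct y hyt

-- B's fold keeps the accumulator (<)-sorted, its members = acc ∪ the cleaned items of xs
lemma pvFold_spec (xs : List String) :
    ∀ acc : List String, acc.Pairwise (· < ·) →
    (xs.foldl pvStep acc).Pairwise (· < ·) ∧
      ∀ x, (x ∈ xs.foldl pvStep acc ↔
        x ∈ acc ∨ x ∈ (xs.filter (fun i => PySem.Str.strip i ≠ "")).map PySem.Str.strip) := by
  induction xs with
  | nil =>
    intro acc hacc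
    exact ⟨hacc, fun x => by rw [List.foldl_nil, List.filter_nil, List.map_nil]; simp⟩
  | cons a rest ih =>
    intro acc hacc
    simp only [List.foldl_cons]
    by_cases h : PySem.Str.strip a ≠ ""
    · have hstep : pvStep acc a = pvInsertUnique acc (PySem.Str.strip a) := by
        simp [pvStep, h]
      obtain ⟨hp, hm⟩ := pvInsertUnique_spec acc hacc (PySem.Str.strip a)
      obtain ⟨hp', hm'⟩ := ih _ hp
      rw [hstep]
      refine ⟨hp', fun x => ?_⟩
      rw [hm' x, hm x, List.filter_cons_of_pos (by simpa using h), List.map_cons]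
      rw [List.mem_cons, or_assoc, or_left_comm]
    · have hstep : pvStep acc a = acc := by simp [pvStep, h]
      rw [hstep]
      obtain ⟨hp', hm'⟩ := ih acc hacc
      refine ⟨hp', fun x => ?_⟩
      rw [hm' x, List.filter_cons_of_neg (by simpa using h)]

theorem normalize_string_values_spec : Claim_equal_normalize_string_values := by
  intro value _
  unfold Spec_normalize_string_values
  cases value with
  | none => rfl
  | some xs =>
    show pySortedUnique ((xs.filter (fun i => PySem.Str.strip i ≠ "")).map PySem.Str.strip)
      = xs.foldl pvStep []
    set L := (xs.filter (fun i => PySem.Str.strip i ≠ "")).map PySem.Str.strip with hL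
    have hLne : ∀ x ∈ L, x ≠ "" := by
      intro x hx
      simp only [hL, List.mem_map, List.mem_filter] at hx
      obtain ⟨i, ⟨_, hi⟩, rfl⟩ := hx
      simpa using hi
    have hfilt : L.filter (fun v => v ≠ "") = L :=
      List.filter_eq_self.mpr (by intro x hx; simpa using hLne x hx)
    obtain ⟨hp, hm⟩ := pvFold_spec xs [] List.Pairwise.nil
    unfold pySortedUnique
    rw [hfilt]
    apply PySem.List.sorted_eq_of_perm_of_pairwise_lt
    · rw [List.perm_ext_iff_of_nodup (hp.imp (fun h => ne_of_lt h)) (PySem.Set.nodup_ofList L)]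
      intro x
      rw [hm x, PySem.Set.mem_ofList]
      simp [hL]
    · exact hp
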